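-- pv_equiv track=rewrite | github.com/sequana/sequana_pipetools | sequana_pipetools/diagnose.py | _extract_error_sections
-- ===== SOURCE A (Python) =====
-- _MAX_LOG_LINES = 150
--
-- def _extract_error_sections(text: str) -> str:
--     """Keep only lines that look like errors / tracebacks to reduce noise."""
--     keep = []
--     in_traceback = False
--     for line in text.splitlines():
--         low = line.lower()
--         if any(k in low for k in ("error", "exception", "traceback", "failed", "exited")):
--             in_traceback = True
--         if in_traceback:
--             keep.append(line)
--             if not line.strip():
--                 in_traceback = False
--     # fallback: return last N lines if nothing matched
--     return "\n".join(keep) if keep else "\n".join(text.splitlines()[-_MAX_LOG_LINES:])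
-- ===== SOURCE B (Python) =====
-- _MAX_LOG_LINES = 150
--
-- def _extract_error_sections(text: str) -> str:
--     """Keep only lines that look like errors / tracebacks to reduce noise."""
--     lines = text.splitlines()
--     n = len(lines)
--     keep = []
--     i = 0
--     while i < n:
--         low = lines[i].lower()
--         if any(k in low for k in ("error", "exception", "traceback", "failed", "exited")):
--             j = i
--             while j < n:
--                 keep.append(lines[j])
--                 if not lines[j].strip():
--                     break
--                 j += 1
--             i = j + 1
--         else:
--             i += 1
--     if keep:
--         return "\n".join(keep)
--     return "\n".join(lines[-_MAX_LOG_LINES:])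
-- ===== Notes on version B (the rewrite author's own statement) =====
-- stated objective: alternative
-- what changed: Replaces the single toggled-boolean scan with an explicit two-level pass: an outer cursor seeks keyword lines and an inner loop copies each block through its terminating blank line, making block boundaries explicit.
import Mathlib
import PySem

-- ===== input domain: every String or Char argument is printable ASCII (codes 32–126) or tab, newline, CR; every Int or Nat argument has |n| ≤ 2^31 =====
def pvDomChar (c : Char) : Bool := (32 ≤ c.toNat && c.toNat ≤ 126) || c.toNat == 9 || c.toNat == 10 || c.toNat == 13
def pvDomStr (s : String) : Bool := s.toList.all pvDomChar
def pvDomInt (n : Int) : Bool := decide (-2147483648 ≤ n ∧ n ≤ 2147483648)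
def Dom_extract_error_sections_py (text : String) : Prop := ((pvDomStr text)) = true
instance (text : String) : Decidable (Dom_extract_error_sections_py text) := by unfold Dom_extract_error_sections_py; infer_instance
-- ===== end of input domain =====

-- B replaces A's toggled-boolean single scan by an explicit outer-seek / inner-copy two-level pass; same result, return value only.

-- ===== PORT A =====
def pvKeywords : List String := ["error", "exception", "traceback", "failed", "exited"]

-- one iteration of A's for-loop over (keep, in_traceback)
def pvAStep (st : List String × Bool) (line : String) : List String × Bool :=
  let low := PySem.Str.lower line
  let inTb := if pvKeywords.any (fun k => PySem.Str.isIn k low) then true else st.2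
  if inTb then
    (st.1 ++ [line], if PySem.Str.strip line == "" then false else inTb)
  else
    (st.1, inTb)

def extract_error_sections_py (text : String) : String :=
  let lines := PySem.Str.splitlines text
  let st := lines.foldl pvAStep ([], false)
  if st.1.isEmpty then
    PySem.Str.join "\n" (PySem.List.slice lines (some (-150)) none)
  else
    PySem.Str.join "\n" st.1

-- ===== PORT B =====
mutual
-- outer cursor: advance until a keyword line, then enter the block copier
def pvScan (ls : List String) : List String :=
  match ls with
  | [] => []
  | l :: rest =>
    if pvKeywords.any (fun k => PySem.Str.isIn k (PySem.Str.lower l)) then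
      -- inner loop, first iteration: append l, stop if it is blank
      if PySem.Str.strip l == "" then l :: pvScan rest else l :: pvBlock rest
    else
      pvScan rest
-- inner loop: copy lines through the terminating blank (inclusive), then resume the outer cursor
def pvBlock (ls : List String) : List String :=
  match ls with
  | [] => []
  | l :: rest =>
    if PySem.Str.strip l == "" then l :: pvScan rest else l :: pvBlock rest
end

def extract_error_sections_py_alt (text : String) : String :=
  let lines := PySem.Str.splitlines text
  let keep := pvScan lines
  if keep.isEmpty then
    PySem.Str.join "\n" (PySem.List.slice lines (some (-150)) none)
  else
    PySem.Str.join "\n" keep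

-- ===== PRECONDITION & SPEC =====
def Spec_extract_error_sections_py (text : String) (out : String) : Prop := out = extract_error_sections_py_alt text
instance (text : String) (out : String) : Decidable (Spec_extract_error_sections_py text out) := by unfold Spec_extract_error_sections_py; infer_instance

-- ===== CLAIM (what is proved, stated in full; the proofs are below) =====
def Claim_equal_extract_error_sections_py : Prop := ∀ (text : String), Dom_extract_error_sections_py text → Spec_extract_error_sections_py text (extract_error_sections_py text)

-- ===== LEMMAS AND PROOFS =====

-- A's fold from flag=false produces pvScan; from flag=true it produces pvBlock.
-- unfolding equations for B's mutual pair on a cons cell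
theorem pvScan_cons (l : String) (rest : List String) :
    pvScan (l :: rest) =
      if pvKeywords.any (fun k => PySem.Str.isIn k (PySem.Str.lower l)) then
        if PySem.Str.strip l == "" then l :: pvScan rest else l :: pvBlock rest
      else pvScan rest := by
  conv_lhs => rw [pvScan]

theorem pvBlock_cons (l : String) (rest : List String) :
    pvBlock (l :: rest) =
      if PySem.Str.strip l == "" then l :: pvScan rest else l :: pvBlock rest := by
  conv_lhs => rw [pvBlock]

-- how one iteration of A's loop acts on each combination of (flag, matched, blank)
theorem pvAStep_false_nomatch (l : String) (keep : List String)
    (hm : pvKeywords.any (fun k => PySem.Str.isIn k (PySem.Str.lower l)) = false) :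
    pvAStep (keep, false) l = (keep, false) := by
  simp only [pvAStep]; rw [hm]; simp

theorem pvAStep_keep_blank (l : String) (keep : List String) (b : Bool)
    (h : pvKeywords.any (fun k => PySem.Str.isIn k (PySem.Str.lower l)) = true ∨ b = true)
    (hb : (PySem.Str.strip l == "") = true) :
    pvAStep (keep, b) l = (keep ++ [l], false) := by
  rcases h with hm | hb' <;> [skip; subst hb'] <;> simp only [pvAStep] <;>
    [rw [hm]; skip] <;> rw [hb] <;> simp

theorem pvAStep_keep_noblank (l : String) (keep : List String) (b : Bool)
    (h : pvKeywords.any (fun k => PySem.Str.isIn k (PySem.Str.lower l)) = true ∨ b = true)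
    (hb : (PySem.Str.strip l == "") = false) :
    pvAStep (keep, b) l = (keep ++ [l], true) := by
  rcases h with hm | hb' <;> [skip; subst hb'] <;> simp only [pvAStep] <;>
    [rw [hm]; skip] <;> rw [hb] <;> simp

theorem pvFold_scan_block (ls : List String) :
    (∀ keep : List String, (ls.foldl pvAStep (keep, false)).1 = keep ++ pvScan ls) ∧
    (∀ keep : List String, (ls.foldl pvAStep (keep, true)).1 = keep ++ pvBlock ls) := by
  induction ls with
  | nil => simp [pvScan, pvBlock]
  | cons l rest ih =>
    constructor <;> intro keep <;> rw [List.foldl_cons]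
    · rw [pvScan_cons]
      cases hm : pvKeywords.any (fun k => PySem.Str.isIn k (PySem.Str.lower l))
      · rw [pvAStep_false_nomatch l keep hm, ih.1]; simp
      · cases hb : (PySem.Str.strip l == "")
        · rw [pvAStep_keep_noblank l keep false (Or.inl hm) hb, ih.2]; simp
        · rw [pvAStep_keep_blank l keep false (Or.inl hm) hb, ih.1]; simp
    · rw [pvBlock_cons]
      cases hb : (PySem.Str.strip l == "")
      · rw [pvAStep_keep_noblank l keep true (Or.inr rfl) hb, ih.2]; simp
      · rw [pvAStep_keep_blank l keep true (Or.inr rfl) hb, ih.1]; simp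

-- ===== VERDICT (by name: the statement is the Claim_ definition above) =====
theorem extract_error_sections_py_spec : Claim_equal_extract_error_sections_py := by
  intro text _
  unfold Spec_extract_error_sections_py
  simp only [extract_error_sections_py, extract_error_sections_py_alt]
  rw [(pvFold_scan_block (PySem.Str.splitlines text)).1 []]
  simp
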